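-- pv_equiv track=rewrite | github.com/vikram-kv/Unified_Parser | pypi_package/build/lib/indic_unified_parser/helpers.py | CleanseWord
-- ===== SOURCE A (Python) =====
-- def rec_replace(input : str, sub : str, tar : str):
--     while True:
--         output = input.replace(sub, tar)
--         if output == input:
--             break
--         input = output
--     return output
--
-- def isEngLetter(p : str) -> int:
--     if (ord(p) >= 97 and ord(p) <= 122):
--         return 1
--     return 0
--
-- def CleanseWord(phone : str) -> str:
--     phonecopy = ""
--     for c in phone:
--         if (c != '&' and isEngLetter(c) == 0):
--             c = '#'
--         phonecopy += c
--     phonecopy = rec_replace(phonecopy, '$','')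
--     phonecopy = rec_replace(phonecopy, '&&','&')
--     return phonecopy
-- ===== SOURCE B (Python) =====
-- class _Tbl(dict):
--     # translation table: lowercase letters and '&' map to themselves, everything else to '#'
--     def __missing__(self, o):
--         if o == 38 or 97 <= o <= 122:
--             return chr(o)
--         return '#'
--
--
-- _T = _Tbl()
--
--
-- def CleanseWord(phone: str) -> str:
--     s = phone.translate(_T)
--     out = []
--     ap = out.append
--     prev = False
--     for c in s:
--         if c == '&':
--             if not prev:
--                 ap(c)
--             prev = True
--         else:
--             ap(c)
--             prev = False
--     return ''.join(out)
-- ===== Notes on version B (the rewrite author's own statement) =====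
-- stated objective: faster
-- what changed: Replaced the quadratic-prone append loop plus the replace-until-fixpoint passes with a C-speed str.translate character map followed by one linear scan that collapses ampersand runs using a previous-was-ampersand flag.
import Mathlib
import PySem

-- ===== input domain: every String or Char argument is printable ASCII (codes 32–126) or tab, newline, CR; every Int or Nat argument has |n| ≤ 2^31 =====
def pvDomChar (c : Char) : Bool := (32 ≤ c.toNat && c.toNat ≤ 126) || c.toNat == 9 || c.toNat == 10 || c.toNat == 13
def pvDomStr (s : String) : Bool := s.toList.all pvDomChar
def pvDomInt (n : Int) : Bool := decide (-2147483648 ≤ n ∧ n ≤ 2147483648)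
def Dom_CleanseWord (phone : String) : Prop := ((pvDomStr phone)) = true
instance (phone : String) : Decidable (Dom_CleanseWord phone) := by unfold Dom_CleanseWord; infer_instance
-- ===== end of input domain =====

-- B replaces A's char-append loop and replace-until-fixpoint passes by a translate
-- table plus one linear collapsing scan (measured faster in a timing run).

-- ===== PORT A =====
-- rec_replace: loop `replace` until fixpoint; fuel input.length+1 only makes the
-- loop total: every run of A's loop on these calls stops within that many
-- iterations, because each non-final `replace` strictly shortens the string.
def recReplaceGo (sub tar : List Char) : Nat → List Char → List Char
  | 0, input => input
  | n + 1, input =>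
    let output := PySem.Chars.replace input sub tar
    if output == input then output else recReplaceGo sub tar n output

def recReplace (input sub tar : List Char) : List Char :=
  recReplaceGo sub tar (input.length + 1) input

def isEngLetter (p : Char) : Int :=
  if 97 ≤ p.toNat ∧ p.toNat ≤ 122 then 1 else 0

def CleanseWord (phone : String) : String :=
  let phonecopy := phone.toList.foldl
    (fun acc c => acc ++ [if c ≠ '&' ∧ isEngLetter c = 0 then '#' else c]) []
  String.ofList (recReplace (recReplace phonecopy ['$'] []) ['&', '&'] ['&'])

-- ===== PORT B =====
-- phone.translate(_T): the table is an empty dict whose __missing__ maps codepoint o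
-- to chr(o) if o == 38 or 97 <= o <= 122 and to '#' otherwise, so translate is
-- exactly this per-character map (ported by hand, exact for every character).
def CleanseWord_alt (phone : String) : String :=
  let s := phone.toList.map
    (fun c => if c.toNat = 38 ∨ (97 ≤ c.toNat ∧ c.toNat ≤ 122) then c else '#')
  let st := s.foldl
    (fun (st : List Char × Bool) c =>
      if c = '&' then
        (if st.2 then (st.1, true) else (st.1 ++ [c], true))
      else (st.1 ++ [c], false))
    ([], false)
  String.ofList st.1

-- ===== PRECONDITION & SPEC =====
def Spec_CleanseWord (phone : String) (out : String) : Prop := out = CleanseWord_alt phone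
instance (phone : String) (out : String) : Decidable (Spec_CleanseWord phone out) := by unfold Spec_CleanseWord; infer_instance

-- ===== CLAIM (what is proved, stated in full; the proofs are below) =====
def Claim_equal_CleanseWord : Prop := ∀ (phone : String), Dom_CleanseWord phone → Spec_CleanseWord phone (CleanseWord phone)

-- ===== LEMMAS AND PROOFS =====

-- the character map A applies, in simplified form
def fmap (c : Char) : Char :=
  if c = '&' then '&' else if 97 ≤ c.toNat ∧ c.toNat ≤ 122 then c else '#'

-- one left-to-right non-overlapping pass of replace "&&" -> "&"
def passAmp : List Char → List Char
  | '&' :: '&' :: t => '&' :: passAmp t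
  | c :: t => c :: passAmp t
  | [] => []

-- collapse runs of '&' given whether the previous kept char was '&'
def col : Bool → List Char → List Char
  | _, [] => []
  | prev, '&' :: t => if prev then col true t else '&' :: col true t
  | _, c :: t => c :: col false t

theorem fA_eq_fmap (c : Char) :
    (if c ≠ '&' ∧ isEngLetter c = 0 then '#' else c) = fmap c := by
  by_cases h : c = '&'
  · simp [h, fmap]
  · by_cases h2 : 97 ≤ c.toNat ∧ c.toNat ≤ 122 <;> simp [fmap, isEngLetter, h, h2]

theorem foldl_map_fA (l : List Char) (acc : List Char) :
    l.foldl (fun acc c => acc ++ [if c ≠ '&' ∧ isEngLetter c = 0 then '#' else c]) acc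
      = acc ++ l.map fmap := by
  induction l generalizing acc with
  | nil => simp
  | cons c t ih => rw [List.foldl_cons, fA_eq_fmap, ih]; simp

theorem fmap_ne_dollar (c : Char) : fmap c ≠ '$' := by
  unfold fmap
  split_ifs with h1 h2
  · decide
  · intro h; subst h; revert h2; decide
  · decide

-- scanning for a '$' that is not there moves char by char and changes nothing
theorem go_dollar (fuel : Nat) (l acc : List Char) (h : '$' ∉ l) :
    PySem.Chars.replace.go ['$'] [] fuel l acc = acc.reverse ++ l := by
  induction fuel generalizing l acc with
  | zero => simp [PySem.Chars.replace.go]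
  | succ n ih =>
    cases l with
    | nil => simp [PySem.Chars.replace.go]
    | cons c t =>
      have hc : c ≠ '$' := by simp at h; tauto
      have ht : '$' ∉ t := by simp at h; tauto
      have hp : List.isPrefixOf ['$'] (c :: t) = false := by
        simp [List.isPrefixOf]; exact fun e => (hc e.symm).elim
      simp [PySem.Chars.replace.go, hp, ih t (c :: acc) ht]

theorem replace_dollar (m : List Char) (h : '$' ∉ m) :
    PySem.Chars.replace m ['$'] [] = m := by
  simp [PySem.Chars.replace, go_dollar m.length m [] h]

theorem recReplace_dollar (m : List Char) (h : '$' ∉ m) :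
    recReplace m ['$'] [] = m := by
  simp [recReplace, recReplaceGo, replace_dollar m h]

-- one replace pass for "&&" -> "&" is `passAmp`
theorem go_amp (fuel : Nat) : ∀ (l acc : List Char), l.length ≤ fuel →
    PySem.Chars.replace.go ['&', '&'] ['&'] fuel l acc = acc.reverse ++ passAmp l := by
  induction fuel with
  | zero =>
    intro l acc h
    have hl : l = [] := by cases l <;> simp_all
    subst hl; simp [PySem.Chars.replace.go, passAmp]
  | succ n ih =>
    intro l acc h
    cases l with
    | nil => simp [PySem.Chars.replace.go, passAmp]
    | cons c t =>
      by_cases hdd : c = '&' ∧ ∃ t', t = '&' :: t'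
      · obtain ⟨rfl, t', rfl⟩ := hdd
        have hp : List.isPrefixOf ['&', '&'] ('&' :: '&' :: t') = true := by
          simp [List.isPrefixOf]
        simp only [PySem.Chars.replace.go, hp, if_pos]
        have hdrop : List.drop ['&', '&'].length ('&' :: '&' :: t') = t' := rfl
        rw [hdrop, ih t' (['&'].reverse ++ acc) (by simp at h ⊢; omega), passAmp.eq_1]
        simp
      · have hcond : ∀ t₁, c = '&' → t = '&' :: t₁ → False := by
          intro t₁ hc ht; exact hdd ⟨hc, t₁, ht⟩
        have hp : List.isPrefixOf ['&', '&'] (c :: t) = false := by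
          cases t with
          | nil => simp [List.isPrefixOf]
          | cons d t' =>
            by_cases hc : c = '&'
            · subst hc
              have hd : d ≠ '&' := fun e => hcond t' rfl (by rw [e])
              simp [List.isPrefixOf]
              exact fun e => hd e.symm
            · simp [List.isPrefixOf]
              exact fun e => ((hc e.symm).elim)
        simp only [PySem.Chars.replace.go, hp, Bool.false_eq_true, if_neg, not_false_iff]
        rw [ih t (c :: acc) (by simp at h ⊢; omega), passAmp.eq_2 c t hcond]
        simp

theorem replace_amp (m : List Char) :
    PySem.Chars.replace m ['&', '&'] ['&'] = passAmp m := by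
  simp [PySem.Chars.replace, go_amp m.length m [] (le_refl _)]

theorem passAmp_length_le (m : List Char) : (passAmp m).length ≤ m.length := by
  fun_induction passAmp m with
  | case1 t ih => simp; omega
  | case2 c t hcond ih => simp; omega
  | case3 => simp

theorem passAmp_length_lt (m : List Char) : passAmp m ≠ m → (passAmp m).length < m.length := by
  fun_induction passAmp m with
  | case1 t ih =>
    intro _
    have := passAmp_length_le t
    simp; omega
  | case2 c t hcond ih =>
    intro h
    have hne : passAmp t ≠ t := by intro e; exact h (by rw [e])
    have := ih hne
    simp; omega
  | case3 => intro h; exact absurd rfl h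

theorem col_head_ne (l : List Char) (h : ∀ d t, l = d :: t → d ≠ '&') :
    col true l = col false l := by
  cases l with
  | nil => rfl
  | cons d t =>
    have hd := h d t rfl
    rw [col.eq_3 true d t (fun e => hd e), col.eq_3 false d t (fun e => hd e)]

theorem col_fix (m : List Char) : passAmp m = m → col false m = m := by
  fun_induction passAmp m with
  | case1 t ih =>
    intro h
    exfalso
    have h1 := passAmp_length_le t
    have h2 : ('&' :: passAmp t).length = ('&' :: '&' :: t).length := by rw [h]
    simp at h2; omega
  | case2 c t hcond ih =>
    intro h
    have hpt : passAmp t = t := by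
      have h' : c :: passAmp t = c :: t := h
      exact (List.cons.injEq _ _ _ _ ▸ h').2
    have hct := ih hpt
    by_cases hc : c = '&'
    · subst hc
      rw [col.eq_2]
      simp only [Bool.false_eq_true, if_neg, not_false_iff]
      rw [col_head_ne t (fun d t' he hd => hcond t' rfl (by rw [he, hd])), hct]
    · rw [col.eq_3 false c t (fun e => hc e), hct]
  | case3 => intro _; rfl

theorem col_passAmp (m : List Char) : ∀ prev, col prev (passAmp m) = col prev m := by
  fun_induction passAmp m with
  | case1 t ih => intro prev; simp [col.eq_2, ih]
  | case2 c t hcond ih =>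
    intro prev
    by_cases hc : c = '&'
    · subst hc; simp [col.eq_2, ih]
    · rw [col.eq_3 prev c (passAmp t) (fun e => hc e), col.eq_3 prev c t (fun e => hc e), ih false]
  | case3 => intro prev; rfl

theorem recReplaceGo_amp (fuel : Nat) : ∀ (m : List Char), m.length < fuel →
    recReplaceGo ['&', '&'] ['&'] fuel m = col false m := by
  induction fuel with
  | zero => intro m h; omega
  | succ n ih =>
    intro m h
    show (if PySem.Chars.replace m ['&', '&'] ['&'] == m then PySem.Chars.replace m ['&', '&'] ['&']
          else recReplaceGo ['&', '&'] ['&'] n (PySem.Chars.replace m ['&', '&'] ['&'])) = col false m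
    rw [replace_amp]
    by_cases he : passAmp m = m
    · simp [he, col_fix m he]
    · have hb : (passAmp m == m) = false := by simp [he]
      rw [hb]
      simp only [Bool.false_eq_true, if_neg, not_false_iff]
      have hlt := passAmp_length_lt m he
      rw [ih (passAmp m) (by omega), col_passAmp]

theorem recReplace_amp (m : List Char) :
    recReplace m ['&', '&'] ['&'] = col false m :=
  recReplaceGo_amp (m.length + 1) m (by omega)

theorem tmap_eq_fmap (c : Char) :
    (if c.toNat = 38 ∨ (97 ≤ c.toNat ∧ c.toNat ≤ 122) then c else '#') = fmap c := by
  by_cases h38 : c.toNat = 38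
  · have hc : c = '&' := by
      have hv : c.val = '&'.val :=
        UInt32.toNat_inj.mp (by rw [show '&'.val.toNat = 38 from rfl]; exact h38)
      exact Char.ext hv
    subst hc; simp [fmap]
  · have hc : c ≠ '&' := fun e => h38 (by subst e; rfl)
    unfold fmap
    rw [if_neg hc]
    by_cases hb : 97 ≤ c.toNat ∧ c.toNat ≤ 122 <;> simp [h38, hb]

theorem foldl_collapse (m : List Char) : ∀ (acc : List Char) (prev : Bool),
    (m.foldl
      (fun (st : List Char × Bool) c =>
        if c = '&' then
          (if st.2 then (st.1, true) else (st.1 ++ [c], true))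
        else (st.1 ++ [c], false))
      (acc, prev)).1 = acc ++ col prev m := by
  induction m with
  | nil => intro acc prev; simp [col]
  | cons c t ih =>
    intro acc prev
    rw [List.foldl_cons]
    by_cases hc : c = '&'
    · subst hc
      rw [col.eq_2]
      cases prev <;> simp [ih]
    · rw [if_neg hc, col.eq_3 prev c t (fun e => hc e), ih]
      simp

theorem no_dollar_map (l : List Char) : '$' ∉ l.map fmap := by
  simp only [List.mem_map, not_exists]
  intro c hc
  exact fmap_ne_dollar c hc.2

-- ===== VERDICT (by name: the statement is the Claim_ definition above) =====
theorem CleanseWord_spec : Claim_equal_CleanseWord := by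
  intro phone _
  unfold Spec_CleanseWord CleanseWord CleanseWord_alt
  simp only [foldl_map_fA, List.nil_append,
    recReplace_dollar _ (no_dollar_map phone.toList), recReplace_amp,
    tmap_eq_fmap, foldl_collapse]
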